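/-
  BLOCK SIZES, `ilog`, AND THE VALUE `compute_bitreverse` STORES: the pure arithmetic under INVARIANTS HD3 (= I5's M1) and M4.
  The documentation of the whole MDCT vocabulary is the header of Vorbis/Mdct.lean; read that first.

  A block size is `n = 2 ^ k` with `6 ≤ k ≤ 13`. `k` IS the `ld` of the C source: `ld = ilog(n) - 1` and `ilog(2 ^ k) = k + 1`
  (`ilogC_ld` below proves it on the C code's own table `log2_4`). Everything here is about numbers; no memory.
-/
import Vorbis.Fields
namespace Vorbis.Mdct

/-! ### 1. Legal block sizes -/

/-- **`n = 2 ^ k` is a legal block size and `k` is its `ld`** (`6 ≤ k ≤ 13`, i.e. `64 ≤ n ≤ 8192`): HD3 for one of the two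
sizes, with the exponent named. The lemmas of the step-3 nest (Vorbis/Mdct/Step3.lean) take this, because their loop bounds
are functions of `ld`. -/
structure Ld (n k : Nat) : Prop where
  /-- the smallest block size is `2 ^ 6` -/
  ge : 6 ≤ k
  /-- the largest block size is `2 ^ 13` -/
  le : k ≤ 13
  /-- the size is the power -/
  eq : n = 2 ^ k

/-- **`n` is a legal block size**: `2 ^ k` for some `6 ≤ k ≤ 13`. What the lemmas of the straight pointer walks take. -/
def IsBlocksize (n : Nat) : Prop := ∃ k, Ld n k

/-- A block size with its exponent forgotten. -/
theorem Ld.isBlocksize {n k : Nat} (h : Ld n k) : IsBlocksize n := ⟨k, h⟩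

/-- The power itself. -/
theorem ld_pow (k : Nat) (h6 : 6 ≤ k) (h13 : k ≤ 13) : Ld (2 ^ k) k := ⟨h6, h13, rfl⟩

/-- **The eight cases**, exponent and size together: `rcases h.cases with ⟨rfl, rfl⟩ | ⟨rfl, rfl⟩ | …` turns every loop bound of
`inverse_mdct` into a numeral. -/
theorem Ld.cases {n k : Nat} (h : Ld n k) :
    (k = 6 ∧ n = 64) ∨ (k = 7 ∧ n = 128) ∨ (k = 8 ∧ n = 256) ∨ (k = 9 ∧ n = 512) ∨
    (k = 10 ∧ n = 1024) ∨ (k = 11 ∧ n = 2048) ∨ (k = 12 ∧ n = 4096) ∨ (k = 13 ∧ n = 8192) := by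
  obtain ⟨h6, h13, rfl⟩ := h
  have hk : k = 6 ∨ k = 7 ∨ k = 8 ∨ k = 9 ∨ k = 10 ∨ k = 11 ∨ k = 12 ∨ k = 13 := by omega
  rcases hk with rfl | rfl | rfl | rfl | rfl | rfl | rfl | rfl <;> omega

/-- The eight sizes. -/
theorem IsBlocksize.cases {n : Nat} (h : IsBlocksize n) :
    n = 64 ∨ n = 128 ∨ n = 256 ∨ n = 512 ∨ n = 1024 ∨ n = 2048 ∨ n = 4096 ∨ n = 8192 := by
  obtain ⟨k, hk⟩ := h
  have := hk.cases
  omega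

/-- Each of the eight sizes is legal (the converse of `cases`). -/
theorem isBlocksize_iff (n : Nat) :
    IsBlocksize n ↔ n = 64 ∨ n = 128 ∨ n = 256 ∨ n = 512 ∨ n = 1024 ∨ n = 2048 ∨ n = 4096 ∨ n = 8192 := by
  constructor
  · exact IsBlocksize.cases
  · intro h
    rcases h with rfl | rfl | rfl | rfl | rfl | rfl | rfl | rfl
    · exact ⟨6, by omega, by omega, by omega⟩
    · exact ⟨7, by omega, by omega, by omega⟩
    · exact ⟨8, by omega, by omega, by omega⟩
    · exact ⟨9, by omega, by omega, by omega⟩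
    · exact ⟨10, by omega, by omega, by omega⟩
    · exact ⟨11, by omega, by omega, by omega⟩
    · exact ⟨12, by omega, by omega, by omega⟩
    · exact ⟨13, by omega, by omega, by omega⟩

/-- **What `omega` needs to know about a block size**: a multiple of 64 between 64 and 8192. Every closed form of the STRAIGHT
loops of `inverse_mdct` (Vorbis/Mdct/Walks.lean) follows from these three facts alone, so a worker whose pointer expression has a
different shape from the lemma's does `have := hn.facts` and then `omega`. (`n / 2`, `n / 4`, `n / 8`, `n / 16` are exact.) -/
theorem IsBlocksize.facts {n : Nat} (h : IsBlocksize n) : n % 64 = 0 ∧ 64 ≤ n ∧ n ≤ 8192 := by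
  have := h.cases
  omega

/-- The `ld` of a block size is unique. -/
theorem Ld.unique {n k k' : Nat} (h : Ld n k) (h' : Ld n k') : k = k' := by
  have h1 := h.cases
  have h2 := h'.cases
  omega

/-- `ld` is the binary logarithm. -/
theorem Ld.log2 {n k : Nat} (h : Ld n k) : n.log2 = k := by
  rw [h.eq]
  exact Nat.log2_two_pow

/-- The two sizes of a stream: `b0 ≤ b1` in sizes is `log0 ≤ log1` in exponents. -/
theorem Ld.le_of_le {n k n' k' : Nat} (h : Ld n k) (h' : Ld n' k') (hle : n ≤ n') : k ≤ k' := by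
  have h1 := h.cases
  have h2 := h'.cases
  omega

/-- The halves, quarters … as shifts (the C source writes `n >> 1`, the machine `sar`): exact divisions. -/
theorem IsBlocksize.shifts {n : Nat} (_h : IsBlocksize n) :
    n >>> 1 = n / 2 ∧ n >>> 2 = n / 4 ∧ n >>> 3 = n / 8 ∧ n >>> 4 = n / 16 ∧ n >>> 5 = n / 32 := by
  omega

/-! ### 2. `ilog` on a block size

`ilog` (stb_vorbis.c 1053–1070) returns the bit length of a non-negative `int` through the 16-entry table `log2_4` (an image
constant: SH7). Its contract gives the result in the table form `c + log2_4[n >> s]`; `ilogC` is that form as a function, and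
`ilogC_ld` evaluates it on the eight block sizes: `ilog(2 ^ k) = k + 1`, so **`ld = ilog(n) - 1 = k`** (not `k - 1`). -/

/-- The table `log2_4` of `ilog` (SH7: the 16 bytes at `120640H`). -/
def log2_4 : List Nat := [0, 1, 2, 2, 3, 3, 3, 3, 4, 4, 4, 4, 4, 4, 4, 4]

/-- `ilog(n)` for `0 ≤ n`, exactly as the C code computes it: the branch, the shift, the table. -/
def ilogC (n : Nat) : Nat :=
  if n < 2 ^ 14 then
    if n < 2 ^ 4 then 0 + log2_4.getD n 0
    else if n < 2 ^ 9 then 5 + log2_4.getD (n >>> 5) 0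
    else 10 + log2_4.getD (n >>> 10) 0
  else if n < 2 ^ 24 then
    if n < 2 ^ 19 then 15 + log2_4.getD (n >>> 15) 0
    else 20 + log2_4.getD (n >>> 20) 0
  else if n < 2 ^ 29 then 25 + log2_4.getD (n >>> 25) 0
  else 30 + log2_4.getD (n >>> 30) 0

/-- **`ilog` of a block size is `ld + 1`.** -/
theorem ilogC_ld {n k : Nat} (h : Ld n k) : ilogC n = k + 1 := by
  rcases h.cases with ⟨rfl, rfl⟩ | ⟨rfl, rfl⟩ | ⟨rfl, rfl⟩ | ⟨rfl, rfl⟩ | ⟨rfl, rfl⟩ | ⟨rfl, rfl⟩ | ⟨rfl, rfl⟩ | ⟨rfl, rfl⟩ <;>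
    decide

/-- Which branch of `ilog` a block size takes, and the table index it loads (for the worker who has the contract of `ilog` in
its table form): sizes below 512 use `5 + log2_4[n >> 5]`, the others `10 + log2_4[n >> 10]`; the index is at most 8. -/
theorem ilog_branch {n : Nat} (h : IsBlocksize n) :
    16 ≤ n ∧ n < 2 ^ 14 ∧ (n < 2 ^ 9 → n >>> 5 ≤ 8) ∧ (2 ^ 9 ≤ n → n >>> 10 ≤ 8) := by
  have := h.cases
  omega

/-! ### 3. The shift count and the stored value of `compute_bitreverse` (the establishment of M4)

Line 1310 stores `(bit_reverse(i) >> (32 - ld + 3)) << 2` into a `uint16`. The machine computes the count as `35 - ld` in `ecx`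
(`mov ecx, 23H ; sub ecx, r13d ; shr eax, cl`) and the hardware MASKS a 32-bit shift count to 5 bits; `lea ebx, [rax * 4]` is the
`<< 2`; `mov [r15], bx` truncates to 16 bits. M4 needs all three to be harmless, whatever `bit_reverse` returned. -/

/-- **The shift count is in `22 .. 29`**, so the 5-bit mask of the hardware is the identity on it (both as `% 32` and as
`&&& 31`, whichever the stepper shows). -/
theorem shift_count {k : Nat} (h6 : 6 ≤ k) (h13 : k ≤ 13) :
    22 ≤ 35 - k ∧ 35 - k ≤ 29 ∧ (35 - k) % 32 = 35 - k ∧ (35 - k) &&& 31 = 35 - k := by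
  have hk : k = 6 ∨ k = 7 ∨ k = 8 ∨ k = 9 ∨ k = 10 ∨ k = 11 ∨ k = 12 ∨ k = 13 := by omega
  rcases hk with rfl | rfl | rfl | rfl | rfl | rfl | rfl | rfl <;> decide

/-- The same about the count as the machine has it: a 32-bit subtraction `35 - ld` with `ld` in a register. -/
theorem shift_count_ld {n k : Nat} (h : Ld n k) :
    22 ≤ 35 - k ∧ 35 - k ≤ 29 ∧ (35 - k) % 32 = 35 - k ∧ (35 - k) &&& 31 = 35 - k :=
  shift_count h.ge h.le

/-- **The value stored by `compute_bitreverse` satisfies M4, whatever `bit_reverse` returned**: for any 32-bit `x`,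
`(x >> (35 - ld)) << 2 ≤ n / 2 - 4`. Also: the `<< 2` does not leave 16 bits (so neither the 32-bit `lea` nor the 16-bit store
truncates it), and the value is a multiple of 4. -/
theorem rev_value {n k : Nat} (h : Ld n k) (x : Nat) (hx : x < 2 ^ 32) :
    (x >>> (35 - k)) <<< 2 ≤ n / 2 - 4 ∧
    (x >>> (35 - k)) <<< 2 < 2 ^ 16 ∧
    ((x >>> (35 - k)) <<< 2) % 2 ^ 16 = (x >>> (35 - k)) <<< 2 ∧
    ((x >>> (35 - k)) <<< 2) % 4 = 0 ∧
    (x >>> (35 - k)) < n / 8 := by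
  rcases h.cases with ⟨rfl, rfl⟩ | ⟨rfl, rfl⟩ | ⟨rfl, rfl⟩ | ⟨rfl, rfl⟩ | ⟨rfl, rfl⟩ | ⟨rfl, rfl⟩ | ⟨rfl, rfl⟩ | ⟨rfl, rfl⟩ <;>
    omega

/-- The same with the `<< 2` written as `* 4` (`lea ebx, [rax * 4]`). -/
theorem rev_value_mul {n k : Nat} (h : Ld n k) (x : Nat) (hx : x < 2 ^ 32) :
    (x >>> (35 - k)) * 4 ≤ n / 2 - 4 ∧ (x >>> (35 - k)) * 4 < 2 ^ 16 := by
  have := rev_value h x hx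
  omega

/-- **Why the count range matters**: with a count that the hardware would mask (here `35 - ld = 32 + 3`, i.e. `ld = 0`, masked
to 3) the bound fails. A recorded counterexample, so that nobody weakens `shift_count`. -/
theorem rev_value_needs_count : ¬ ((0xFFFFFFFF >>> ((35 - 0) % 32)) <<< 2 ≤ 64 / 2 - 4) := by
  decide

end Vorbis.Mdct
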